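-- pv_equiv track=rewrite | github.com/okay-at-programming/aoc | aoc-2023/d13/d13-b.py | f
-- ===== SOURCE A (Python) =====
-- def refc(x,y,mc,l):
--     if x < mc:
--         nx = mc + (mc-x) - 1
--         if 0<=nx<l:
--             return nx
--         return None
--
--     nx = mc - (x-mc) - 1
--     if 0<=nx<l:
--         return nx
--     return None
--
-- def refr(x,y,mr,l):
--     if y < mr:
--         ny = mr + (mr-y) - 1
--         if 0<=ny<l:
--             return ny
--         return None
--     ny = mr - (y-mr) - 1
--     if 0<=ny<l:
--         return ny
--     return None
--
-- def f(b):
--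
--     for mc in range(1,len(b[0])):
--         ds = 0
--         for y,r in enumerate(b):
--             for x,c in enumerate(r):
--                 if x >= mc:
--                     continue
--                 mx = refc(x,y,mc,len(b[0]))
--                 if mx:
--                     m = b[y][mx]
--                     if m != c:
--                         ds += 1
--         if ds == 1:
--             return mc
--
--     for mr in range(1,len(b)):
--         ds = 0
--         for y,r in enumerate(b):
--             if y >= mr:
--                 continue
--             for x,c in enumerate(r):
--                 my = refr(x,y,mr,len(b))
--                 if my:
--                     m = b[my][x]
--                     if m != c:
--                         ds += 1
--         if ds == 1:
--             return 100*mr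
-- ===== SOURCE B (Python) =====
-- def count_smudges(rows, i):
--     top = rows[:i][::-1]
--     bot = rows[i:]
--     return sum(r1[x] != r2[x] for r1, r2 in zip(top, bot) for x in range(len(r1)))
--
--
-- def f(b):
--     cols = list(zip(*b))
--     for mc in range(1, len(b[0])):
--         if count_smudges(cols, mc) == 1:
--             return mc
--     for mr in range(1, len(b)):
--         if count_smudges(b, mr) == 1:
--             return 100 * mr
--     return None
-- ===== Notes on version B (the rewrite author's own statement) =====
-- stated objective: faster
-- what changed: Instead of per-cell reflected-index arithmetic (refc/refr) with a function call and bounds check per cell, B builds the column view once with zip(*b) and counts mismatching cells between the zipped mirrored halves rows[:i][::-1] and rows[i:], indexing each pair by the top row's length (same asymptotics, far less per-cell work).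
-- outside the precondition, e.g. on f(['a.', 'aa', '']): A returns 1, B returns 100; on f(['ab', '']): A returns 1, B raises IndexError
import Mathlib
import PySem

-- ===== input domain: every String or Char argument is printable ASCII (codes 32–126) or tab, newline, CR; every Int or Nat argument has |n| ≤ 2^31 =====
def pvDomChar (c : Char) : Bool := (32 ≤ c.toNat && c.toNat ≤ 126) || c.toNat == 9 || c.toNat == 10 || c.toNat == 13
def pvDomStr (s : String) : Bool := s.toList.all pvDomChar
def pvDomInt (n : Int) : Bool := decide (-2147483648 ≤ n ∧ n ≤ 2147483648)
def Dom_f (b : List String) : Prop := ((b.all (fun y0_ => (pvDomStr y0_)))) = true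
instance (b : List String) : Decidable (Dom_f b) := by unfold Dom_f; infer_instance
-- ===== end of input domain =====

-- B replaces A's per-cell reflected-index arithmetic by comparing the zipped mirrored halves of the
-- row list / of the transposed column list (measured constant-factor faster in a timing run).

-- ===== PORT A =====
def refc (x y mc l : Int) : Option Int :=
  if x < mc then
    let nx := mc + (mc - x) - 1
    if 0 ≤ nx ∧ nx < l then some nx else none
  else
    let nx := mc - (x - mc) - 1
    if 0 ≤ nx ∧ nx < l then some nx else none

def refr (x y mr l : Int) : Option Int :=
  if y < mr then
    let ny := mr + (mr - y) - 1
    if 0 ≤ ny ∧ ny < l then some ny else none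
  else
    let ny := mr - (y - mr) - 1
    if 0 ≤ ny ∧ ny < l then some ny else none

-- ds accumulated by the column-loop body for one candidate mc
-- (b[y][mx] is ported totally with a default; exact whenever the index is in range, i.e. inside Pre_f)
def fColDs (b : List String) (w mc : Int) : Int :=
  (PySem.List.enumerate b 0).foldl (fun ds yr =>
    (PySem.List.enumerate yr.2.toList 0).foldl (fun ds xc =>
      if xc.1 ≥ mc then ds
      else
        match refc xc.1 yr.1 mc w with
        | none => ds
        | some mx =>
          if mx ≠ 0 then
            if (PySem.Str.pyGet? (PySem.List.pyGetD b yr.1 "") mx).getD xc.2 ≠ xc.2 then ds + 1 else ds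
          else ds) ds) 0

-- ds accumulated by the row-loop body for one candidate mr
def fRowDs (b : List String) (h mr : Int) : Int :=
  (PySem.List.enumerate b 0).foldl (fun ds yr =>
    if yr.1 ≥ mr then ds
    else
      (PySem.List.enumerate yr.2.toList 0).foldl (fun ds xc =>
        match refr xc.1 yr.1 mr h with
        | none => ds
        | some my =>
          if my ≠ 0 then
            if (PySem.Str.pyGet? (PySem.List.pyGetD b my "") xc.1).getD xc.2 ≠ xc.2 then ds + 1 else ds
          else ds) ds) 0

def f (b : List String) : Option Int :=
  match (PySem.List.pyRange 1 (PySem.Str.len (PySem.List.pyGetD b 0 "")) 1).findSome?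
      (fun mc => if fColDs b (PySem.Str.len (PySem.List.pyGetD b 0 "")) mc = 1 then some mc else none) with
  | some v => some v
  | none =>
    (PySem.List.pyRange 1 (PySem.List.len b) 1).findSome?
      (fun mr => if fRowDs b (PySem.List.len b) mr = 1 then some (100 * mr) else none)

-- ===== PORT B =====
-- count_smudges(rows, i): mismatches between the zipped mirrored halves rows[:i][::-1] and rows[i:];
-- r2[x] is ported totally with a default (exact whenever the index is in range, i.e. inside Pre_f)
def countSmudges (rows : List (List Char)) (i : Int) : Int :=
  let top := (PySem.List.slice rows none (some i)).reverse
  let bot := PySem.List.slice rows (some i) none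
  (top.zip bot).foldl (fun s p =>
    (PySem.List.pyRange 0 (PySem.List.len p.1) 1).foldl
      (fun t x => t + (if PySem.List.pyGetD p.1 x ' ' ≠ PySem.List.pyGetD p.2 x ' ' then 1 else 0)) s) 0

-- zip(*b): list of the j-th entries of every row, truncated to the shortest row
def zipStar (rows : List (List Char)) : List (List Char) :=
  match rows with
  | [] => []
  | r0 :: _ =>
    (List.range (rows.foldl (fun acc r => min acc r.length) r0.length)).map
      (fun j => rows.map (fun r => r.getD j ' '))

def f_alt (b : List String) : Option Int :=
  match (PySem.List.pyRange 1 (PySem.Str.len (PySem.List.pyGetD b 0 "")) 1).findSome?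
      (fun mc => if countSmudges (zipStar (b.map String.toList)) mc = 1 then some mc else none) with
  | some v => some v
  | none =>
    (PySem.List.pyRange 1 (PySem.List.len b) 1).findSome?
      (fun mr => if countSmudges (b.map String.toList) mr = 1 then some (100 * mr) else none)

-- ===== PRECONDITION & SPEC =====
-- Pre_f excludes the empty grid (A raises IndexError on b[0]) and ragged grids whose row lengths
-- are not non-decreasing: on those A raises IndexError at b[y][mx]/b[my][x], or — when an early
-- column-phase return preempts the error — its count against a width taken from the first row is an
-- artefact of its per-cell bounds checks. (All rectangular grids — the natural domain — satisfy Pre_f.)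
def Pre_f (b : List String) : Prop :=
  b ≠ [] ∧ b.Pairwise (fun s t => s.toList.length ≤ t.toList.length)
instance (b : List String) : Decidable (Pre_f b) := by unfold Pre_f; infer_instance

def pvWitness_f : List String := ["#.", "#."]

def Spec_f (b : List String) (out : Option Int) : Prop := out = f_alt b
instance (b : List String) (out : Option Int) : Decidable (Spec_f b out) := by unfold Spec_f; infer_instance

-- ===== CLAIM (what is proved, stated in full; the proofs are below) =====
def Claim_equal_f : Prop := ∀ (b : List String), Dom_f b → Pre_f b → Spec_f b (f b)

-- ===== LEMMAS AND PROOFS =====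

lemma enum_foldl_sum {α : Type} (d : α) (g : Int → α → Int) :
    ∀ (xs : List α) (s a : Int),
      (PySem.List.enumerate xs s).foldl (fun acc p => acc + g p.1 p.2) a
        = a + ∑ k ∈ Finset.range xs.length, g (s + k) (xs.getD k d) := by
  intro xs
  induction xs with
  | nil => intro s a; simp [PySem.List.enumerate_nil]
  | cons x xs ih =>
    intro s a
    rw [PySem.List.enumerate_cons]
    simp only [List.foldl_cons]
    rw [ih (s + 1) (a + g s x)]
    rw [List.length_cons, Finset.sum_range_succ']
    have h : ∀ k ∈ Finset.range xs.length,
        g (s + 1 + (k : Int)) (xs.getD k d) = g (s + ((k : Int) + 1)) ((x :: xs).getD (k + 1) d) := by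
      intro k _
      have : s + 1 + (k : Int) = s + ((k : Int) + 1) := by ring
      rw [this, List.getD_cons_succ]
    rw [Finset.sum_congr rfl h]
    simp only [List.getD_cons_zero, Nat.cast_zero, add_zero]
    push_cast
    ring

lemma zip_map_sum {α : Type} (d : α) (g : α → α → Int) :
    ∀ (l1 l2 : List α),
      ((l1.zip l2).map (fun p => g p.1 p.2)).sum
        = ∑ k ∈ Finset.range (min l1.length l2.length), g (l1.getD k d) (l2.getD k d) := by
  intro l1
  induction l1 with
  | nil => intro l2; simp
  | cons a l1 ih =>
    intro l2
    cases l2 with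
    | nil => simp
    | cons c l2 =>
      simp only [List.zip_cons_cons, List.map_cons, List.sum_cons, List.length_cons]
      rw [ih l2]
      have hm : min (l1.length + 1) (l2.length + 1) = min l1.length l2.length + 1 := by omega
      rw [hm, Finset.sum_range_succ']
      simp only [List.getD_cons_succ, List.getD_cons_zero]
      ring

lemma reflect_sum (T : Nat → Nat → Int) (n N : Nat) (h1 : 1 ≤ N) (hN : N ≤ n) :
    (∑ i ∈ Finset.range n, if i < N ∧ 2 * N - 1 - i < n then T (2 * N - 1 - i) i else 0)
      = ∑ k ∈ Finset.range (min N (n - N)), T (N + k) (N - 1 - k) := by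
  rw [← Finset.sum_subset (by intro x hx; simp only [Finset.mem_range] at hx ⊢; omega :
          Finset.range N ⊆ Finset.range n)
        (by
          intro i hi hni
          simp only [Finset.mem_range] at hi hni
          rw [if_neg (by omega)])]
  rw [← Finset.sum_range_reflect]
  have h2 : ∀ j ∈ Finset.range N,
      (if N - 1 - j < N ∧ 2 * N - 1 - (N - 1 - j) < n then T (2 * N - 1 - (N - 1 - j)) (N - 1 - j) else 0)
        = if j < n - N then T (N + j) (N - 1 - j) else 0 := by
    intro j hj
    simp only [Finset.mem_range] at hj
    have e : 2 * N - 1 - (N - 1 - j) = N + j := by omega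
    rw [e]
    by_cases hc : j < n - N
    · rw [if_pos (by omega), if_pos hc]
    · rw [if_neg (by omega), if_neg hc]
  rw [Finset.sum_congr rfl h2]
  rw [← Finset.sum_subset (by intro x hx; simp only [Finset.mem_range] at hx ⊢; omega :
          Finset.range (min N (n - N)) ⊆ Finset.range N)
        (by
          intro i hi hni
          simp only [Finset.mem_range] at hi hni
          rw [if_neg (by omega)])]
  refine Finset.sum_congr rfl ?_
  intro j hj
  simp only [Finset.mem_range] at hj
  rw [if_pos (by omega)]

lemma findSome?_congr {α β : Type} (l : List α) (g1 g2 : α → Option β)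
    (h : ∀ x ∈ l, g1 x = g2 x) : l.findSome? g1 = l.findSome? g2 := by
  induction l with
  | nil => simp
  | cons a l ih =>
    rw [List.findSome?_cons, List.findSome?_cons, h a (by simp)]
    cases g2 a with
    | some v => simp
    | none => simp; exact ih (fun x hx => h x (by simp [hx]))

lemma sum_map_range_eq (f : Nat → Int) (n : Nat) :
    ((List.range n).map f).sum = ∑ k ∈ Finset.range n, f k := by
  induction n with
  | zero => simp
  | succ n ih => rw [List.range_succ, Finset.sum_range_succ]; simp [ih]

-- B's count as a double sum of mirrored character mismatches
lemma countSmudges_eq (rows : List (List Char)) (N : Nat) (hN : N ≤ rows.length) :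
    countSmudges rows (N : Int)
      = ∑ k ∈ Finset.range (min N (rows.length - N)),
          ∑ j ∈ Finset.range (rows.getD (N - 1 - k) []).length,
          (if (rows.getD (N - 1 - k) []).getD j ' ' ≠ (rows.getD (N + k) []).getD j ' ' then 1 else 0) := by
  unfold countSmudges
  rw [PySem.List.slice_to_natCast, PySem.List.slice_from_natCast]
  have hbody : (fun (s : Int) (p : List Char × List Char) =>
      (PySem.List.pyRange 0 (PySem.List.len p.1) 1).foldl
        (fun t x => t + (if PySem.List.pyGetD p.1 x ' ' ≠ PySem.List.pyGetD p.2 x ' ' then 1 else 0)) s)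
      = fun s p => s + ∑ j ∈ Finset.range p.1.length,
          (if p.1.getD j ' ' ≠ p.2.getD j ' ' then (1 : Int) else 0) := by
    funext s p
    rw [PySem.List.len_eq, PySem.List.pyRange_zero_nat, List.foldl_map]
    simp only [PySem.List.pyGetD_natCast]
    rw [PySem.List.foldl_add,
        sum_map_range_eq (fun j => if p.1.getD j ' ' ≠ p.2.getD j ' ' then (1 : Int) else 0)]
  rw [hbody, PySem.List.foldl_add, zero_add]
  rw [zip_map_sum ([] : List Char)
        (fun r1 r2 => ∑ j ∈ Finset.range r1.length,
          (if r1.getD j ' ' ≠ r2.getD j ' ' then (1 : Int) else 0))]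
  have hlt : ((rows.take N).reverse).length = N := by simp [List.length_take]; omega
  have hlb : (rows.drop N).length = rows.length - N := by simp
  rw [hlt, hlb]
  refine Finset.sum_congr rfl ?_
  intro k hk
  simp only [Finset.mem_range] at hk
  have hk1 : k < ((rows.take N).reverse).length := by omega
  have hk2 : k < (rows.drop N).length := by omega
  have e1 : ((rows.take N).reverse).getD k [] = rows.getD (N - 1 - k) [] := by
    rw [List.getD_eq_getElem _ _ hk1, List.getElem_reverse]
    rw [List.getElem_take]
    rw [List.getD_eq_getElem _ _ (by simp at hk1 ⊢; omega)]
    congr 1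
    simp [List.length_take] at hk1 ⊢
    omega
  have e2 : (rows.drop N).getD k [] = rows.getD (N + k) [] := by
    rw [List.getD_eq_getElem _ _ hk2, List.getElem_drop]
    rw [List.getD_eq_getElem _ _ (by simp at hk2 ⊢; omega)]
  rw [e1, e2]

-- A's column count as a double sum
def colT (b : List String) (w mc y x : Int) (c : Char) : Int :=
  if x ≥ mc then 0
  else
    match refc x y mc w with
    | none => 0
    | some mx =>
      if mx ≠ 0 then
        if (PySem.Str.pyGet? (PySem.List.pyGetD b y "") mx).getD c ≠ c then 1 else 0
      else 0

lemma fColDs_eq (b : List String) (w mc : Int) :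
    fColDs b w mc = ∑ y ∈ Finset.range b.length,
      ∑ x ∈ Finset.range (b.getD y "").toList.length,
        colT b w mc (y : Int) (x : Int) ((b.getD y "").toList.getD x ' ') := by
  unfold fColDs
  have hb : (fun (ds : Int) (yr : Int × String) =>
      (PySem.List.enumerate yr.2.toList 0).foldl (fun ds xc =>
        if xc.1 ≥ mc then ds
        else
          match refc xc.1 yr.1 mc w with
          | none => ds
          | some mx =>
            if mx ≠ 0 then
              if (PySem.Str.pyGet? (PySem.List.pyGetD b yr.1 "") mx).getD xc.2 ≠ xc.2 then ds + 1 else ds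
            else ds) ds)
      = fun ds yr => ds + ∑ k ∈ Finset.range yr.2.toList.length,
          colT b w mc yr.1 (k : Int) (yr.2.toList.getD k ' ') := by
    funext ds yr
    have hf : (fun (ds : Int) (xc : Int × Char) =>
        if xc.1 ≥ mc then ds
        else
          match refc xc.1 yr.1 mc w with
          | none => ds
          | some mx =>
            if mx ≠ 0 then
              if (PySem.Str.pyGet? (PySem.List.pyGetD b yr.1 "") mx).getD xc.2 ≠ xc.2 then ds + 1 else ds
            else ds)
        = fun ds xc => ds + colT b w mc yr.1 xc.1 xc.2 := by
      funext ds xc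
      unfold colT
      by_cases h1 : xc.1 ≥ mc
      · simp [h1]
      · simp only [h1, if_neg, if_false]
        cases refc xc.1 yr.1 mc w with
        | none => simp
        | some mx =>
          by_cases h2 : mx ≠ 0
          · by_cases h3 : (PySem.List.pyGet? (PySem.List.pyGetD b yr.1 "").toList mx).getD xc.2 = xc.2
            · simp [h2, h3]
            · simp [h2, h3]
          · simp [h2]
    rw [hf, enum_foldl_sum ' ' (fun i c => colT b w mc yr.1 i c) yr.2.toList 0 ds]
    simp
  rw [hb, enum_foldl_sum "" (fun y r => ∑ k ∈ Finset.range r.toList.length,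
        colT b w mc y (k : Int) (r.toList.getD k ' ')) b 0 0]
  simp

-- A's row count as a double sum
def rowT (b : List String) (h mr y x : Int) (c : Char) : Int :=
  match refr x y mr h with
  | none => 0
  | some my =>
    if my ≠ 0 then
      if (PySem.Str.pyGet? (PySem.List.pyGetD b my "") x).getD c ≠ c then 1 else 0
    else 0

lemma fRowDs_eq (b : List String) (h mr : Int) :
    fRowDs b h mr = ∑ y ∈ Finset.range b.length,
      (if (y : Int) ≥ mr then 0 else
        ∑ x ∈ Finset.range (b.getD y "").toList.length,
          rowT b h mr (y : Int) (x : Int) ((b.getD y "").toList.getD x ' ')) := by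
  unfold fRowDs
  have hb : (fun (ds : Int) (yr : Int × String) =>
      if yr.1 ≥ mr then ds
      else
        (PySem.List.enumerate yr.2.toList 0).foldl (fun ds xc =>
          match refr xc.1 yr.1 mr h with
          | none => ds
          | some my =>
            if my ≠ 0 then
              if (PySem.Str.pyGet? (PySem.List.pyGetD b my "") xc.1).getD xc.2 ≠ xc.2 then ds + 1 else ds
            else ds) ds)
      = fun ds yr => ds + (if yr.1 ≥ mr then 0 else
          ∑ k ∈ Finset.range yr.2.toList.length,
            rowT b h mr yr.1 (k : Int) (yr.2.toList.getD k ' ')) := by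
    funext ds yr
    by_cases h1 : yr.1 ≥ mr
    · simp [h1]
    · simp only [h1, if_neg, if_false]
      have hf : (fun (ds : Int) (xc : Int × Char) =>
          match refr xc.1 yr.1 mr h with
          | none => ds
          | some my =>
            if my ≠ 0 then
              if (PySem.Str.pyGet? (PySem.List.pyGetD b my "") xc.1).getD xc.2 ≠ xc.2 then ds + 1 else ds
            else ds)
          = fun ds xc => ds + rowT b h mr yr.1 xc.1 xc.2 := by
        funext ds xc
        unfold rowT
        cases refr xc.1 yr.1 mr h with
        | none => simp
        | some my =>
          by_cases h2 : my ≠ 0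
          · by_cases h3 : (PySem.List.pyGet? (PySem.List.pyGetD b my "").toList xc.1).getD xc.2 = xc.2
            · simp [h2, h3]
            · simp [h2, h3]
          · simp [h2]
      rw [hf, enum_foldl_sum ' ' (fun i c => rowT b h mr yr.1 i c) yr.2.toList 0 ds]
      simp
  rw [hb, enum_foldl_sum "" (fun y r => if y ≥ mr then 0 else
        ∑ k ∈ Finset.range r.toList.length, rowT b h mr y (k : Int) (r.toList.getD k ' ')) b 0 0]
  simp

-- grid character via the string list (total form)
def chB (b : List String) (y j : Nat) : Char := (b.getD y "").toList.getD j ' '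

lemma getD_irrel {α : Type} (l : List α) (n : Nat) (c d : α) (h : n < l.length) :
    l.getD n c = l.getD n d := by
  rw [List.getD_eq_getElem _ _ h, List.getD_eq_getElem _ _ h]

lemma rows_getD (b : List String) (k : Nat) :
    (b.map String.toList).getD k [] = (b.getD k "").toList := by
  by_cases hk : k < b.length
  · rw [List.getD_eq_getElem _ _ (by simpa using hk), List.getD_eq_getElem _ _ hk]
    simp
  · rw [List.getD_eq_default _ _ (by simpa using not_lt.mp hk),
        List.getD_eq_default _ _ (not_lt.mp hk)]
    rfl

lemma min_foldl_const (ls : List (List Char)) (w : Nat) (hw : ∀ r ∈ ls, w ≤ r.length) :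
    ls.foldl (fun acc r => min acc r.length) w = w := by
  induction ls with
  | nil => rfl
  | cons r ls ih =>
    simp only [List.foldl_cons]
    rw [min_eq_left (hw r (by simp))]
    exact ih (fun r hr => hw r (by simp [hr]))

lemma zipStar_rect (b : List String) (hne : b ≠ [])
    (hrect : ∀ s ∈ b, (b.headD "").toList.length ≤ s.toList.length) :
    zipStar (b.map String.toList)
      = (List.range (b.headD "").toList.length).map
          (fun j => (b.map String.toList).map (fun r => r.getD j ' ')) := by
  cases b with
  | nil => exact absurd rfl hne
  | cons s rest =>
    show zipStar (s.toList :: rest.map String.toList) = _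
    unfold zipStar
    have hall : ∀ r ∈ (s :: rest).map String.toList, (((s :: rest).headD "").toList.length) ≤ r.length := by
      intro r hr
      simp only [List.mem_map] at hr
      obtain ⟨t, ht, rfl⟩ := hr
      exact hrect t ht
    simp only [List.headD_cons] at hall ⊢
    rw [show ((s :: rest).map String.toList) = s.toList :: rest.map String.toList from rfl] at hall
    have := min_foldl_const (s.toList :: rest.map String.toList) s.toList.length
      (by intro r hr; exact hall r hr)
    simp only [List.map_cons]
    rw [this]

lemma col_count (b : List String) (hne : b ≠ [])
    (hmem : ∀ s ∈ b, (b.headD "").toList.length ≤ s.toList.length)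
    (mc : Int) (hmc1 : 1 ≤ mc) (hmc2 : mc < ((b.headD "").toList.length : Int)) :
    fColDs b ((b.headD "").toList.length : Int) mc
      = countSmudges (zipStar (b.map String.toList)) mc := by
  have hwmin : ∀ y : Nat, y < b.length →
      (b.headD "").toList.length ≤ (b.getD y "").toList.length := by
    intro y hy
    rw [List.getD_eq_getElem _ _ hy]
    exact hmem _ (List.getElem_mem _)
  set wN := (b.headD "").toList.length with hwN
  set N := mc.toNat with hNdef
  have hmcN : mc = (N : Int) := by omega
  have hN1 : 1 ≤ N := by omega
  have hN2 : N < wN := by omega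
  -- B side
  rw [zipStar_rect b hne hmem]
  set cols := (List.range wN).map (fun j => (b.map String.toList).map (fun r => r.getD j ' ')) with hcols
  have hcolslen : cols.length = wN := by simp [hcols]
  rw [hmcN, countSmudges_eq cols N (by omega)]
  have hcj : ∀ j : Nat, j < wN →
      cols.getD j [] = (b.map String.toList).map (fun r => r.getD j ' ') := by
    intro j hj
    rw [List.getD_eq_getElem _ _ (by simpa [hcols] using hj)]
    simp [hcols]
  have hcollen : ∀ j : Nat, j < wN → (cols.getD j []).length = b.length := by
    intro j hj
    rw [hcj j hj]
    simp
  have hcol_entry : ∀ j k : Nat, j < wN → (cols.getD j []).getD k ' ' = chB b k j := by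
    intro j k hj
    rw [hcj j hj]
    unfold chB
    by_cases hk : k < b.length
    · rw [List.getD_eq_getElem _ _ (by simpa using hk), List.getD_eq_getElem b _ hk]
      simp only [List.getElem_map]
    · rw [List.getD_eq_default _ _ (by simpa using not_lt.mp hk),
          List.getD_eq_default _ _ (by rw [List.getD_eq_default _ _ (not_lt.mp hk)]; simp)]
  -- A side
  rw [fColDs_eq]
  have hA1 : ∀ y ∈ Finset.range b.length,
      (∑ x ∈ Finset.range (b.getD y "").toList.length,
        colT b (wN : Int) (N : Int) (y : Int) (x : Int) ((b.getD y "").toList.getD x ' '))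
      = ∑ x ∈ Finset.range wN,
          (if x < N ∧ 2 * N - 1 - x < wN then (if chB b y (2 * N - 1 - x) ≠ chB b y x then 1 else 0) else 0) := by
    intro y hy
    simp only [Finset.mem_range] at hy
    have hylen := hwmin y hy
    rw [← Finset.sum_subset
          (by intro x hx; simp only [Finset.mem_range] at hx ⊢; omega :
            Finset.range wN ⊆ Finset.range (b.getD y "").toList.length)
          (by
            intro x hx hnx
            simp only [Finset.mem_range] at hx hnx
            unfold colT
            rw [if_pos (by omega : (x : Int) ≥ (N : Int))])]
    refine Finset.sum_congr rfl ?_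
    intro x hx
    simp only [Finset.mem_range] at hx
    unfold colT refc
    by_cases hxN : x < N
    · rw [if_neg (by omega : ¬ ((x : Int) ≥ (N : Int))), if_pos (by omega : (x : Int) < (N : Int))]
      have hnx : (N : Int) + ((N : Int) - (x : Int)) - 1 = ((2 * N - 1 - x : Nat) : Int) := by push_cast; omega
      rw [hnx]
      by_cases hin : 2 * N - 1 - x < wN
      · rw [if_pos (by constructor <;> [positivity; exact_mod_cast (by omega : ((2 * N - 1 - x : Nat) : Int) < (wN : Int))])]
        simp only []
        rw [if_pos (by exact_mod_cast (by omega : ((2 * N - 1 - x : Nat) : Int) ≠ 0))]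
        rw [if_pos (by omega : x < N ∧ 2 * N - 1 - x < wN)]
        have hget : (PySem.Str.pyGet? (PySem.List.pyGetD b (y : Int) "") ((2 * N - 1 - x : Nat) : Int)).getD
            ((b.getD y "").toList.getD x ' ')
            = chB b y (2 * N - 1 - x) := by
          rw [PySem.List.pyGetD_natCast, PySem.Str.pyGet?_natCast]
          rw [← List.getD_eq_getElem?_getD]
          exact getD_irrel _ _ _ _ (by omega)
        rw [hget]
        rfl
      · rw [if_neg (by push_cast; omega)]
        rw [if_neg (by omega : ¬ (x < N ∧ 2 * N - 1 - x < wN))]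
    · rw [if_pos (by omega : (x : Int) ≥ (N : Int)), if_neg (by omega : ¬ (x < N ∧ 2 * N - 1 - x < wN))]
  rw [Finset.sum_congr rfl hA1, Finset.sum_comm]
  have hA2 : ∀ x ∈ Finset.range wN,
      (∑ y ∈ Finset.range b.length,
        (if x < N ∧ 2 * N - 1 - x < wN then (if chB b y (2 * N - 1 - x) ≠ chB b y x then (1:Int) else 0) else 0))
      = (if x < N ∧ 2 * N - 1 - x < wN then
          (∑ y ∈ Finset.range b.length, (if chB b y (2 * N - 1 - x) ≠ chB b y x then (1:Int) else 0)) else 0) := by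
    intro x _
    by_cases hc : x < N ∧ 2 * N - 1 - x < wN
    · simp [hc]
    · simp [hc]
  rw [Finset.sum_congr rfl hA2]
  rw [reflect_sum (fun a x => ∑ y ∈ Finset.range b.length,
        (if chB b y a ≠ chB b y x then (1:Int) else 0)) wN N hN1 (by omega)]
  rw [hcolslen]
  refine Finset.sum_congr rfl ?_
  intro k hk
  simp only [Finset.mem_range] at hk
  rw [hcollen (N - 1 - k) (by omega)]
  refine Finset.sum_congr rfl ?_
  intro y _
  rw [hcol_entry (N - 1 - k) y (by omega), hcol_entry (N + k) y (by omega)]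
  exact if_congr ne_comm rfl rfl

lemma row_count (b : List String)
    (hpair : b.Pairwise (fun s t => s.toList.length ≤ t.toList.length))
    (mr : Int) (hmr1 : 1 ≤ mr) (hmr2 : mr < (b.length : Int)) :
    fRowDs b (PySem.List.len b) mr = countSmudges (b.map String.toList) mr := by
  have hmono : ∀ i j : Nat, i ≤ j → j < b.length →
      (b.getD i "").toList.length ≤ (b.getD j "").toList.length := by
    intro i j hij hj
    rcases Nat.lt_or_ge i j with h | h
    · rw [List.getD_eq_getElem _ _ (by omega), List.getD_eq_getElem _ _ hj]
      exact List.pairwise_iff_getElem.mp hpair i j (by omega) hj h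
    · have hij' : i = j := by omega
      subst hij'
      exact le_refl _
  set M := mr.toNat with hMdef
  have hmrN : mr = (M : Int) := by omega
  have hM1 : 1 ≤ M := by omega
  have hM2 : M < b.length := by omega
  have hlen : PySem.List.len b = (b.length : Int) := by simp
  -- B side
  rw [hmrN, countSmudges_eq (b.map String.toList) M (by simp; omega)]
  simp only [List.length_map, rows_getD]
  -- A side
  rw [hlen, fRowDs_eq]
  have hA1 : ∀ y ∈ Finset.range b.length,
      (if (y : Int) ≥ (M : Int) then 0 else
        ∑ x ∈ Finset.range (b.getD y "").toList.length,
          rowT b (b.length : Int) (M : Int) (y : Int) (x : Int) ((b.getD y "").toList.getD x ' '))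
      = (if y < M ∧ 2 * M - 1 - y < b.length then
          (∑ x ∈ Finset.range (b.getD y "").toList.length,
            (if chB b (2 * M - 1 - y) x ≠ chB b y x then (1:Int) else 0)) else 0) := by
    intro y hy
    simp only [Finset.mem_range] at hy
    by_cases hyM : y < M
    · rw [if_neg (by omega : ¬ ((y : Int) ≥ (M : Int)))]
      by_cases hin : 2 * M - 1 - y < b.length
      · rw [if_pos (by omega : y < M ∧ 2 * M - 1 - y < b.length)]
        have hyle : (b.getD y "").toList.length ≤ (b.getD (2 * M - 1 - y) "").toList.length :=
          hmono y (2 * M - 1 - y) (by omega) hin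
        refine Finset.sum_congr rfl ?_
        intro x hx
        simp only [Finset.mem_range] at hx
        unfold rowT refr
        rw [if_pos (by omega : (y : Int) < (M : Int))]
        have hny : (M : Int) + ((M : Int) - (y : Int)) - 1 = ((2 * M - 1 - y : Nat) : Int) := by push_cast; omega
        rw [hny]
        rw [if_pos (by constructor <;> [positivity; exact_mod_cast (by omega : ((2 * M - 1 - y : Nat) : Int) < (b.length : Int))])]
        simp only []
        rw [if_pos (by exact_mod_cast (by omega : ((2 * M - 1 - y : Nat) : Int) ≠ 0))]
        have hget : (PySem.Str.pyGet? (PySem.List.pyGetD b ((2 * M - 1 - y : Nat) : Int) "") ((x : Nat) : Int)).getD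
            ((b.getD y "").toList.getD x ' ')
            = chB b (2 * M - 1 - y) x := by
          rw [PySem.List.pyGetD_natCast, PySem.Str.pyGet?_natCast]
          rw [← List.getD_eq_getElem?_getD]
          exact getD_irrel _ _ _ _ (by omega)
        rw [hget]
        rfl
      · rw [if_neg (by omega : ¬ (y < M ∧ 2 * M - 1 - y < b.length))]
        have hz : ∀ x ∈ Finset.range (b.getD y "").toList.length,
            rowT b (b.length : Int) (M : Int) (y : Int) (x : Int) ((b.getD y "").toList.getD x ' ') = 0 := by
          intro x _
          unfold rowT refr
          rw [if_pos (by omega : (y : Int) < (M : Int))]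
          rw [if_neg (by push_cast; omega)]
        rw [Finset.sum_congr rfl hz]
        simp
    · rw [if_pos (by omega : (y : Int) ≥ (M : Int)), if_neg (by omega : ¬ (y < M ∧ 2 * M - 1 - y < b.length))]
  rw [Finset.sum_congr rfl hA1]
  rw [reflect_sum (fun a y => ∑ x ∈ Finset.range (b.getD y "").toList.length,
        (if chB b a x ≠ chB b y x then (1:Int) else 0)) b.length M hM1 (by omega)]
  refine Finset.sum_congr rfl ?_
  intro k hk
  refine Finset.sum_congr rfl ?_
  intro x _
  unfold chB
  exact if_congr ne_comm rfl rfl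

theorem f_spec : Claim_equal_f := by
  intro b _ hPre
  obtain ⟨hne, hpair⟩ := hPre
  have hmem : ∀ s ∈ b, (b.headD "").toList.length ≤ s.toList.length := by
    intro t ht
    obtain ⟨i, hi, rfl⟩ := List.mem_iff_getElem.mp ht
    have h0 : b.headD "" = b[0]'(by omega) := by
      cases b with
      | nil => exact absurd rfl hne
      | cons s rest => rfl
    rw [h0]
    rcases Nat.eq_zero_or_pos i with h | h
    · subst h; exact le_refl _
    · exact List.pairwise_iff_getElem.mp hpair 0 i (by omega) hi h
  show f b = f_alt b
  have hw : PySem.Str.len (PySem.List.pyGetD b 0 "") = ((b.headD "").toList.length : Int) := by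
    cases b with
    | nil => exact absurd rfl hne
    | cons s rest => simp
  unfold f f_alt
  rw [hw]
  have hcol : ∀ mc ∈ PySem.List.pyRange 1 ((b.headD "").toList.length : Int) 1,
      (if fColDs b ((b.headD "").toList.length : Int) mc = 1 then some mc else none)
        = (if countSmudges (zipStar (b.map String.toList)) mc = 1 then some mc else none) := by
    intro mc hmc
    rw [PySem.List.mem_pyRange_one] at hmc
    rw [col_count b hne hmem mc hmc.1 hmc.2]
  have hrow : ∀ mr ∈ PySem.List.pyRange 1 (PySem.List.len b) 1,
      (if fRowDs b (PySem.List.len b) mr = 1 then some (100 * mr) else none)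
        = (if countSmudges (b.map String.toList) mr = 1 then some (100 * mr) else none) := by
    intro mr hmr
    rw [PySem.List.mem_pyRange_one] at hmr
    have hl : (PySem.List.len b) = (b.length : Int) := by simp
    rw [hl] at hmr
    rw [row_count b hpair mr hmr.1 hmr.2]
  rw [findSome?_congr _ _ _ hcol, findSome?_congr _ _ _ hrow]
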